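-- pv_equiv track=rewrite | github.com/joshuadavidthomas/django-language-server | template_linter/src/template_linter/template_syntax/filter_syntax.py | _parse_filter_chain
-- ===== SOURCE A (Python) =====
-- def _split_unquoted(s: str, sep: str) -> list[str]:
--     parts: list[str] = []
--     current: list[str] = []
--     in_quotes = False
--     quote_char = ""
--
--     for ch in s:
--         if ch in ("'", '"'):
--             if not in_quotes:
--                 in_quotes = True
--                 quote_char = ch
--             elif quote_char == ch:
--                 in_quotes = False
--                 quote_char = ""
--         if ch == sep and not in_quotes:
--             parts.append("".join(current))
--             current = []
--         else:
--             current.append(ch)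
--     parts.append("".join(current))
--     return parts
--
-- def _split_first_unquoted(s: str, sep: str) -> tuple[str, str | None]:
--     in_quotes = False
--     quote_char = ""
--     for i, ch in enumerate(s):
--         if ch in ("'", '"'):
--             if not in_quotes:
--                 in_quotes = True
--                 quote_char = ch
--             elif quote_char == ch:
--                 in_quotes = False
--                 quote_char = ""
--         if ch == sep and not in_quotes:
--             return s[:i], s[i + 1 :]
--     return s, None
--
-- def _parse_filter_chain(expr: str) -> list[tuple[str, bool]]:
--     parts = _split_unquoted(expr, "|")
--     if len(parts) <= 1:
--         return []
--     filters: list[tuple[str, bool]] = []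
--     for part in parts[1:]:
--         part = part.strip()
--         if not part:
--             continue
--         name, arg = _split_first_unquoted(part, ":")
--         name = name.strip()
--         has_arg = arg is not None and arg.strip() != ""
--         if name:
--             filters.append((name, has_arg))
--     return filters
-- ===== SOURCE B (Python) =====
-- def _parse_filter_chain(expr: str) -> list[tuple[str, bool]]:
--     """Single linear pass: split at unquoted '|' and at the first unquoted ':'
--     of each segment on the fly, instead of building a parts list and rescanning
--     each part for its colon."""
--     filters: list[tuple[str, bool]] = []
--     name_buf: list[str] = []
--     arg_buf = None  # None until the segment's first unquoted ':' is seen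
--     quote = None  # the currently open quote character, or None
--     seen_pipe = False
--
--     def emit():
--         name = "".join(name_buf).strip()
--         if name:
--             has_arg = arg_buf is not None and "".join(arg_buf).strip() != ""
--             filters.append((name, has_arg))
--
--     for ch in expr:
--         if ch in ("'", '"'):
--             if quote is None:
--                 quote = ch
--             elif quote == ch:
--                 quote = None
--         if ch == "|" and quote is None:
--             if seen_pipe:
--                 emit()
--             seen_pipe = True
--             name_buf = []
--             arg_buf = None
--         elif ch == ":" and quote is None and arg_buf is None:
--             arg_buf = []
--         elif arg_buf is None:
--             name_buf.append(ch)
--         else: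
--             arg_buf.append(ch)
--
--     if not seen_pipe:
--         return []
--     emit()
--     return filters
-- ===== Notes on version B (the rewrite author's own statement) =====
-- stated objective: simpler
-- what changed: A builds a list of pipe-separated parts and then rescans each part with a second quote-tracking pass to find its colon; B is one linear pass over expr that tracks the quote state once and routes each character into a name buffer or an arg buffer, emitting a (name, has_arg) pair at each unquoted pipe and at end of string.
import Mathlib
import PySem

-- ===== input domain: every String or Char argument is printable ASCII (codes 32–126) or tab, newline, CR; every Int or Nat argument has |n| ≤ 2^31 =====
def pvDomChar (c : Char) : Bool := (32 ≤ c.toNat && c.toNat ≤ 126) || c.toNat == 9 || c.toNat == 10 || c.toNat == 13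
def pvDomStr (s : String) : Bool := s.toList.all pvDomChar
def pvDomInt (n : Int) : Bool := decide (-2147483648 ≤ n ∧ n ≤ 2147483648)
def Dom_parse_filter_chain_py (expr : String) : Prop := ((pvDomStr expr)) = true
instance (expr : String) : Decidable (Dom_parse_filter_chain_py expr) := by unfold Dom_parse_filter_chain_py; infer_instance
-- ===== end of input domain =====

-- B replaces A's split-into-parts-then-rescan-each-part-for-its-colon with ONE linear pass that
-- tracks the quote state, the current name/arg buffers and the first unquoted ':' on the fly (simpler decomposition).

-- ===== PORT A =====
-- the quote-state update shared by A's two helpers (the `if ch in ("'", '"'): …` block)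
def pvQCharA (inQ : Bool) (qc : String) (ch : Char) : Bool × String :=
  if ch = '\'' ∨ ch = '"' then
    if inQ = false then (true, String.ofList [ch])
    else if qc = String.ofList [ch] then (false, "")
    else (inQ, qc)
  else (inQ, qc)

-- _split_unquoted's loop: state (parts, current, in_quotes, quote_char)
def pvSplitUnquotedA : List Char → Char → List (List Char) → List Char → Bool → String → List (List Char)
  | [], _, parts, cur, _, _ => parts ++ [cur]
  | ch :: rest, sep, parts, cur, inQ, qc =>
    let s := pvQCharA inQ qc ch
    if ch = sep ∧ s.1 = false then pvSplitUnquotedA rest sep (parts ++ [cur]) [] s.1 s.2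
    else pvSplitUnquotedA rest sep parts (cur ++ [ch]) s.1 s.2

-- _split_first_unquoted's loop; the accumulated prefix `pre` is s[:i], the rest is s[i+1:]
def pvSplitFirstA : List Char → Char → Bool → String → List Char → List Char × Option (List Char)
  | [], _, _, _, pre => (pre, none)
  | ch :: rest, sep, inQ, qc, pre =>
    let s := pvQCharA inQ qc ch
    if ch = sep ∧ s.1 = false then (pre, some rest)
    else pvSplitFirstA rest sep s.1 s.2 (pre ++ [ch])

-- the body of _parse_filter_chain's `for part in parts[1:]` loop
def pvProcPartA (fs : List (String × Bool)) (part0 : List Char) : List (String × Bool) :=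
  let part := PySem.Chars.strip part0
  if part = [] then fs
  else
    let p := pvSplitFirstA part ':' false "" []
    let name := PySem.Chars.strip p.1
    let hasArg : Bool := match p.2 with
      | none => false
      | some a => decide (PySem.Chars.strip a ≠ [])
    if name ≠ [] then fs ++ [(String.ofList name, hasArg)] else fs

def parse_filter_chain_py (expr : String) : List (String × Bool) :=
  let parts := pvSplitUnquotedA expr.toList '|' [] [] false ""
  if parts.length ≤ 1 then []
  else (parts.drop 1).foldl pvProcPartA []

-- ===== PORT B =====
-- B's quote-state update (open-quote char or none)
def pvQStep (q : Option Char) (ch : Char) : Option Char :=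
  if ch = '\'' ∨ ch = '"' then
    match q with
    | none => some ch
    | some c => if c = ch then none else some c
  else q

-- B's emit(): flush the segment buffers into the result
def pvEmit (fs : List (String × Bool)) (nb : List Char) (ab : Option (List Char)) : List (String × Bool) :=
  let name := PySem.Chars.strip nb
  if name ≠ [] then
    fs ++ [(String.ofList name,
            match ab with
            | none => false
            | some a => decide (PySem.Chars.strip a ≠ []))]
  else fs

-- B's non-pipe character handling: route ch into the name or arg buffer
def pvSegStep (nb : List Char) (ab : Option (List Char)) (q' : Option Char) (ch : Char) :
    List Char × Option (List Char) :=
  if ch = ':' ∧ q' = none ∧ ab = none then (nb, some [])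
  else match ab with
    | none => (nb ++ [ch], none)
    | some a => (nb, some (a ++ [ch]))

-- B's single pass: state (filters, name_buf, arg_buf, quote, seen_pipe)
def pvAltAux : List Char → List (String × Bool) → List Char → Option (List Char) → Option Char → Bool → List (String × Bool)
  | [], fs, nb, ab, _, sp => if sp then pvEmit fs nb ab else []
  | ch :: rest, fs, nb, ab, q, sp =>
    let q' := pvQStep q ch
    if ch = '|' ∧ q' = none then
      pvAltAux rest (if sp then pvEmit fs nb ab else fs) [] none q' true
    else
      let s := pvSegStep nb ab q' ch
      pvAltAux rest fs s.1 s.2 q' sp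

def parse_filter_chain_py_alt (expr : String) : List (String × Bool) :=
  pvAltAux expr.toList [] [] none none false

-- ===== PRECONDITION & SPEC =====
def Spec_parse_filter_chain_py (expr : String) (out : List (String × Bool)) : Prop := out = parse_filter_chain_py_alt expr
instance (expr : String) (out : List (String × Bool)) : Decidable (Spec_parse_filter_chain_py expr out) := by unfold Spec_parse_filter_chain_py; infer_instance

-- ===== CLAIM (what is proved, stated in full; the proofs are below) =====
def Claim_equal_parse_filter_chain_py : Prop := ∀ (expr : String), Dom_parse_filter_chain_py expr → Spec_parse_filter_chain_py expr (parse_filter_chain_py expr)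

-- ===== LEMMAS AND PROOFS =====

-- B's per-character segment step, as a fold step over the state (name_buf, arg_buf, quote)
def pvStep (st : List Char × Option (List Char) × Option Char) (ch : Char) :
    List Char × Option (List Char) × Option Char :=
  let q' := pvQStep st.2.2 ch
  let s := pvSegStep st.1 st.2.1 q' ch
  (s.1, s.2, q')

-- correspondence between A's (in_quotes, quote_char) and B's Option Char quote state
def pvQrel (inQ : Bool) (qc : String) (q : Option Char) : Prop :=
  match q with
  | none => inQ = false
  | some c => inQ = true ∧ qc = String.ofList [c]

theorem pvQrel_step {inQ : Bool} {qc : String} {q : Option Char} (ch : Char)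
    (h : pvQrel inQ qc q) :
    pvQrel (pvQCharA inQ qc ch).1 (pvQCharA inQ qc ch).2 (pvQStep q ch) := by
  cases q with
  | none =>
    simp only [pvQrel] at h
    subst h
    by_cases hq : ch = '\'' ∨ ch = '"'
    · simp [pvQCharA, pvQStep, hq, pvQrel]
    · simp [pvQCharA, pvQStep, hq, pvQrel]
  | some c =>
    obtain ⟨h1, h2⟩ := h
    subst h1; subst h2
    by_cases hq : ch = '\'' ∨ ch = '"'
    · by_cases hc : c = ch
      · subst hc; simp [pvQCharA, pvQStep, hq, pvQrel]
      · have hne : String.ofList [c] ≠ String.ofList [ch] := by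
          simp [String.ofList_inj, hc]
        simp [pvQCharA, pvQStep, hq, hc, hne, pvQrel]
    · simp [pvQCharA, pvQStep, hq, pvQrel]

theorem pvQrel_false {inQ : Bool} {qc : String} {q : Option Char} (h : pvQrel inQ qc q) :
    inQ = false ↔ q = none := by
  cases q with
  | none => simp only [pvQrel] at h; simp [h]
  | some c => obtain ⟨h1, _⟩ := h; subst h1; simp

-- once the arg buffer is open, the rest of the segment is appended verbatim
theorem pvFold_some (s : List Char) (nb a : List Char) (q : Option Char) :
    s.foldl pvStep (nb, some a, q) = (nb, some (a ++ s), s.foldl pvQStep q) := by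
  induction s generalizing a q with
  | nil => simp [List.foldl]
  | cons ch t ih =>
    rw [List.foldl_cons, List.foldl_cons]
    have hstep : pvStep (nb, some a, q) ch = (nb, some (a ++ [ch]), pvQStep q ch) := by
      simp [pvStep, pvSegStep]
    rw [hstep, ih]
    simp

-- the initial name buffer is a passive prefix
theorem pvFold_shift (s : List Char) (nb0 nb1 : List Char) (q0 : Option Char) :
    s.foldl pvStep (nb0 ++ nb1, none, q0) =
      ((nb0 ++ (s.foldl pvStep (nb1, none, q0)).1), (s.foldl pvStep (nb1, none, q0)).2) := by
  induction s generalizing nb1 q0 with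
  | nil => simp [List.foldl]
  | cons ch t ih =>
    rw [List.foldl_cons, List.foldl_cons]
    by_cases hc : ch = ':' ∧ pvQStep q0 ch = none
    · obtain ⟨hc1, hc2⟩ := hc
      subst hc1
      have h1 : pvStep (nb0 ++ nb1, none, q0) ':' = (nb0 ++ nb1, some [], pvQStep q0 ':') := by
        simp [pvStep, pvSegStep, hc2]
      have h2 : pvStep (nb1, none, q0) ':' = (nb1, some [], pvQStep q0 ':') := by
        simp [pvStep, pvSegStep, hc2]
      rw [h1, h2, pvFold_some, pvFold_some]
    · have h1 : pvStep (nb0 ++ nb1, none, q0) ch = (nb0 ++ (nb1 ++ [ch]), none, pvQStep q0 ch) := by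
        simp only [pvStep, pvSegStep]
        simp only [and_true]
        rw [if_neg hc]
        simp
      have h2 : pvStep (nb1, none, q0) ch = (nb1 ++ [ch], none, pvQStep q0 ch) := by
        simp only [pvStep, pvSegStep]
        simp only [and_true]
        rw [if_neg hc]
      rw [h1, h2, ih]

theorem pvFold_shift0 (s : List Char) (nb0 : List Char) (q0 : Option Char) :
    s.foldl pvStep (nb0, none, q0) =
      ((nb0 ++ (s.foldl pvStep ([], none, q0)).1), (s.foldl pvStep ([], none, q0)).2) := by
  simpa using pvFold_shift s nb0 [] q0

-- if no unquoted colon fires, everything lands in the name buffer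
theorem pvFold_none (s : List Char) (nb0 : List Char) (q0 : Option Char)
    (h : (s.foldl pvStep (nb0, none, q0)).2.1 = none) :
    s.foldl pvStep (nb0, none, q0) = (nb0 ++ s, none, s.foldl pvQStep q0) := by
  induction s generalizing nb0 q0 with
  | nil => simp [List.foldl]
  | cons ch t ih =>
    rw [List.foldl_cons] at h ⊢
    by_cases hc : ch = ':' ∧ pvQStep q0 ch = none
    · exfalso
      obtain ⟨hc1, hc2⟩ := hc
      subst hc1
      have hstep : pvStep (nb0, none, q0) ':' = (nb0, some [], pvQStep q0 ':') := by
        simp [pvStep, pvSegStep, hc2]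
      rw [hstep, pvFold_some] at h
      simp at h
    · have hstep : pvStep (nb0, none, q0) ch = (nb0 ++ [ch], none, pvQStep q0 ch) := by
        simp only [pvStep, pvSegStep]
        simp only [and_true]
        rw [if_neg hc]
      rw [hstep] at h ⊢
      rw [ih _ _ h, List.foldl_cons]
      simp

-- if the arg buffer fired, the segment splits at a first unquoted colon
theorem pvFold_split (s : List Char) (nb0 : List Char) (q0 : Option Char) (nb : List Char)
    (a : List Char) (qf : Option Char)
    (h : s.foldl pvStep (nb0, none, q0) = (nb, some a, qf)) :
    ∃ u, s = u ++ ':' :: a ∧ u.foldl pvStep (nb0, none, q0) = (nb0 ++ u, none, none) ∧ nb = nb0 ++ u := by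
  induction s generalizing nb0 q0 with
  | nil =>
    simp [List.foldl] at h
  | cons ch t ih =>
    rw [List.foldl_cons] at h
    by_cases hc : ch = ':' ∧ pvQStep q0 ch = none
    · obtain ⟨hc1, hc2⟩ := hc
      subst hc1
      have hq0 : pvQStep q0 ':' = q0 := by simp [pvQStep]
      rw [hq0] at hc2
      subst hc2
      have hstep : pvStep (nb0, none, none) ':' = (nb0, some [], none) := by
        simp [pvStep, pvSegStep, pvQStep]
      rw [hstep, pvFold_some] at h
      simp only [List.nil_append, Prod.mk.injEq] at h
      have ht : t = a := by
        have := h.2.1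
        injection this
      refine ⟨[], by simp [ht], by simp [List.foldl], by simp [h.1]⟩
    · have hstep : pvStep (nb0, none, q0) ch = (nb0 ++ [ch], none, pvQStep q0 ch) := by
        simp only [pvStep, pvSegStep]
        simp only [and_true]
        rw [if_neg hc]
      rw [hstep] at h
      obtain ⟨u', hs, hf, hnb⟩ := ih _ _ h
      refine ⟨ch :: u', by simp [hs], ?_, by simp [hnb]⟩
      rw [List.foldl_cons, hstep, hf]
      simp

theorem pvFold_prefix (u v : List Char)
    (h : ((u ++ v).foldl pvStep ([], none, none)).2.1 = none) :
    (u.foldl pvStep ([], none, none)).2.1 = none := by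
  by_contra hne
  obtain ⟨a, ha⟩ := Option.ne_none_iff_exists'.mp hne
  rw [List.foldl_append] at h
  set r := u.foldl pvStep ([], none, none) with hr
  have hrr : r = (r.1, r.2.1, r.2.2) := rfl
  rw [hrr, ha, pvFold_some] at h
  simp at h

-- A's colon scan equals B's fold
theorem pvScan_eq (s : List Char) (pre : List Char) (inQ : Bool) (qc : String) (q : Option Char)
    (h : pvQrel inQ qc q) :
    pvSplitFirstA s ':' inQ qc pre =
      ((s.foldl pvStep (pre, none, q)).1, (s.foldl pvStep (pre, none, q)).2.1) := by
  induction s generalizing pre inQ qc q with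
  | nil => simp [pvSplitFirstA, List.foldl]
  | cons ch t ih =>
    have hrel' := pvQrel_step ch h
    have hiff := pvQrel_false hrel'
    rw [List.foldl_cons]
    by_cases hcol : ch = ':' ∧ pvQStep q ch = none
    · obtain ⟨hc1, hc2⟩ := hcol
      subst hc1
      have hA : (pvQCharA inQ qc ':').1 = false := hiff.mpr hc2
      have hstep : pvStep (pre, none, q) ':' = (pre, some [], pvQStep q ':') := by
        simp [pvStep, pvSegStep, hc2]
      rw [hstep, hc2, pvFold_some]
      simp [pvSplitFirstA, hA]
    · have hstep : pvStep (pre, none, q) ch = (pre ++ [ch], none, pvQStep q ch) := by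
        simp only [pvStep, pvSegStep]
        simp only [and_true]
        rw [if_neg hcol]
      have hA : ¬ (ch = ':' ∧ (pvQCharA inQ qc ch).1 = false) := by
        intro hx
        exact hcol ⟨hx.1, hiff.mp hx.2⟩
      rw [hstep]
      rw [show pvSplitFirstA (ch :: t) ':' inQ qc pre
            = pvSplitFirstA t ':' (pvQCharA inQ qc ch).1 (pvQCharA inQ qc ch).2 (pre ++ [ch]) from by
        simp [pvSplitFirstA, hA]]
      exact ih _ _ _ _ hrel'

-- whitespace facts
theorem pv_ws_step (c : Char) (hc : PySem.Chars.isspace c = true)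
    (st : List Char × Option Char) :
    pvStep (st.1, none, st.2) c = (st.1 ++ [c], none, st.2) := by
  have h1 : c ≠ ':' := by intro e; subst e; exact absurd hc (by decide)
  have h2 : c ≠ '\'' := by intro e; subst e; exact absurd hc (by decide)
  have h3 : c ≠ '"' := by intro e; subst e; exact absurd hc (by decide)
  simp [pvStep, pvQStep, pvSegStep, h1, h2, h3]

theorem pvFold_ws (W s : List Char) (hW : ∀ c ∈ W, PySem.Chars.isspace c = true)
    (nb0 : List Char) (q0 : Option Char) :
    (W ++ s).foldl pvStep (nb0, none, q0) = s.foldl pvStep (nb0 ++ W, none, q0) := by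
  induction W generalizing nb0 with
  | nil => simp
  | cons c W' ih =>
    have hcw := hW c (by simp)
    have hstep := pv_ws_step c hcw (nb0, q0)
    simp only [List.cons_append, List.foldl_cons]
    simp only at hstep
    rw [hstep, ih (fun x hx => hW x (by simp [hx]))]
    simp

theorem pv_rstrip_append (xs ys : List Char) (y : Char) (hy : PySem.Chars.isspace y = false) :
    PySem.Chars.rstrip (xs ++ y :: ys) = xs ++ y :: PySem.Chars.rstrip ys := by
  simp only [PySem.Chars.rstrip, List.reverse_append, List.reverse_cons, List.append_assoc,
    List.singleton_append, List.dropWhile_append, List.dropWhile_cons, hy]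
  by_cases he : (List.dropWhile PySem.Chars.isspace ys.reverse).isEmpty
  · rw [List.isEmpty_iff] at he
    simp [he]
  · simp [he]

theorem pv_lstrip_append (W t : List Char) (hW : ∀ c ∈ W, PySem.Chars.isspace c = true) :
    PySem.Chars.lstrip (W ++ t) = PySem.Chars.lstrip t := by
  have hW0 : List.dropWhile PySem.Chars.isspace W = [] := by
    rw [List.dropWhile_eq_nil_iff]
    exact hW
  simp [PySem.Chars.lstrip, List.dropWhile_append, hW0]

theorem pv_strip_append_colon (u v : List Char) :
    PySem.Chars.strip (u ++ ':' :: v) =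
      PySem.Chars.lstrip u ++ ':' :: PySem.Chars.rstrip v := by
  have hcol : PySem.Chars.isspace ':' = false := by decide
  have hl : PySem.Chars.lstrip (u ++ ':' :: v) = PySem.Chars.lstrip u ++ ':' :: v := by
    simp only [PySem.Chars.lstrip, List.dropWhile_append]
    by_cases he : (List.dropWhile PySem.Chars.isspace u).isEmpty
    · rw [List.isEmpty_iff] at he
      simp [he, hcol]
    · simp [he]
  simp only [PySem.Chars.strip, hl]
  exact pv_rstrip_append _ _ _ hcol

theorem pv_lstrip_rstrip (s : List Char) :
    PySem.Chars.lstrip (PySem.Chars.rstrip s) = PySem.Chars.rstrip (PySem.Chars.lstrip s) := by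
  have hsplit : List.takeWhile PySem.Chars.isspace s ++ PySem.Chars.lstrip s = s :=
    List.takeWhile_append_dropWhile
  have hWws : ∀ c ∈ List.takeWhile PySem.Chars.isspace s, PySem.Chars.isspace c = true :=
    fun c hc => List.mem_takeWhile_imp hc
  rcases hls : PySem.Chars.lstrip s with _ | ⟨y, ys⟩
  · have hall : ∀ c ∈ s, PySem.Chars.isspace c = true := by
      intro c hc
      rw [← hsplit, hls, List.append_nil] at hc
      exact hWws c hc
    have hr : PySem.Chars.rstrip s = [] := by
      simp only [PySem.Chars.rstrip]
      have : List.dropWhile PySem.Chars.isspace s.reverse = [] := by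
        rw [List.dropWhile_eq_nil_iff]
        intro c hc
        exact hall c (List.mem_reverse.mp hc)
      simp [this]
    rw [hr]
    rfl
  · have hy : PySem.Chars.isspace y = false := by
      have := List.head_dropWhile_not PySem.Chars.isspace (l := s)
      rw [show List.dropWhile PySem.Chars.isspace s = PySem.Chars.lstrip s from rfl, hls] at this
      simpa using this (by simp)
    have hs' : s = List.takeWhile PySem.Chars.isspace s ++ y :: ys := by
      conv_lhs => rw [← hsplit]
      rw [hls]
    have e1 : PySem.Chars.rstrip s = List.takeWhile PySem.Chars.isspace s ++ y :: PySem.Chars.rstrip ys := by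
      conv_lhs => rw [hs']
      exact pv_rstrip_append _ _ _ hy
    have e2 : PySem.Chars.lstrip (PySem.Chars.rstrip s) = y :: PySem.Chars.rstrip ys := by
      rw [e1, pv_lstrip_append _ _ hWws]
      simp [PySem.Chars.lstrip, hy]
    rw [e2]
    have := pv_rstrip_append [] ys y hy
    simpa using this.symm

theorem pv_strip_lstrip (s : List Char) :
    PySem.Chars.strip (PySem.Chars.lstrip s) = PySem.Chars.strip s := by
  simp [PySem.Chars.strip, PySem.Chars.lstrip, List.dropWhile_idempotent]

theorem pv_strip_rstrip (s : List Char) :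
    PySem.Chars.strip (PySem.Chars.rstrip s) = PySem.Chars.strip s := by
  have hidem : ∀ x : List Char, PySem.Chars.rstrip (PySem.Chars.rstrip x) = PySem.Chars.rstrip x := by
    intro x
    simp [PySem.Chars.rstrip, List.dropWhile_idempotent]
  simp only [PySem.Chars.strip]
  rw [pv_lstrip_rstrip, hidem]

theorem pv_rstrip_decomp (s : List Char) :
    ∃ R, s = PySem.Chars.rstrip s ++ R := by
  refine ⟨(List.takeWhile PySem.Chars.isspace s.reverse).reverse, ?_⟩
  simp only [PySem.Chars.rstrip]
  rw [← List.reverse_append, List.takeWhile_append_dropWhile, List.reverse_reverse]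

-- processing one raw segment with A's strip-then-rescan equals B's buffered emit
theorem pvEmit_eq (cur : List Char) (fs : List (String × Bool)) :
    pvProcPartA fs cur =
      pvEmit fs (cur.foldl pvStep ([], none, none)).1 (cur.foldl pvStep ([], none, none)).2.1 := by
  have hrel0 : pvQrel false "" (none : Option Char) := rfl
  rcases hab : (cur.foldl pvStep ([], none, none)).2.1 with _ | a
  · -- no unquoted colon in the raw segment
    have hfull := pvFold_none cur [] none (by simpa using hab)
    simp only [List.nil_append] at hfull
    by_cases hp : PySem.Chars.strip cur = []
    · simp [pvProcPartA, pvEmit, hp, hfull]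
    · -- the fold over the stripped segment also finds no colon
      have hdecomp := List.takeWhile_append_dropWhile (p := PySem.Chars.isspace) (l := cur)
      have hWws : ∀ c ∈ List.takeWhile PySem.Chars.isspace cur, PySem.Chars.isspace c = true :=
        fun c hc => List.mem_takeWhile_imp hc
      have h1 : cur.foldl pvStep ([], none, none)
          = (PySem.Chars.lstrip cur).foldl pvStep (List.takeWhile PySem.Chars.isspace cur, none, none) := by
        conv_lhs => rw [← hdecomp]
        have hws := pvFold_ws (List.takeWhile PySem.Chars.isspace cur) (PySem.Chars.lstrip cur) hWws [] none
        simp only [List.nil_append] at hws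
        exact hws
      rw [pvFold_shift0 (PySem.Chars.lstrip cur) (List.takeWhile PySem.Chars.isspace cur) none] at h1
      have h2 : ((PySem.Chars.lstrip cur).foldl pvStep ([], none, none)).2.1 = none := by
        have := congrArg (fun p => p.2.1) h1
        simpa [hab] using this.symm
      obtain ⟨R, hR⟩ := pv_rstrip_decomp (PySem.Chars.lstrip cur)
      have h3 : ((PySem.Chars.strip cur).foldl pvStep ([], none, none)).2.1 = none := by
        apply pvFold_prefix (PySem.Chars.strip cur) R
        rw [show PySem.Chars.strip cur ++ R = PySem.Chars.lstrip cur from hR.symm]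
        exact h2
      have h4 := pvFold_none (PySem.Chars.strip cur) [] none h3
      have h5 := pvScan_eq (PySem.Chars.strip cur) [] false "" none hrel0
      rw [h4] at h5
      simp only [List.nil_append] at h5
      have hstripstrip : PySem.Chars.strip (PySem.Chars.strip cur) = PySem.Chars.strip cur := by
        rw [show PySem.Chars.strip (PySem.Chars.strip cur)
              = PySem.Chars.strip (PySem.Chars.rstrip (PySem.Chars.lstrip cur)) from rfl,
           pv_strip_rstrip, pv_strip_lstrip]
      simp [pvProcPartA, pvEmit, hp, hfull, h5, hstripstrip]
  · -- the raw segment splits at its first unquoted colon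
    obtain ⟨u, hcur, hfu, hnb⟩ :=
      pvFold_split cur [] none _ a _ (by rw [← hab])
    simp only [List.nil_append] at hfu hnb
    have hstrip : PySem.Chars.strip cur = PySem.Chars.lstrip u ++ ':' :: PySem.Chars.rstrip a := by
      rw [hcur]; exact pv_strip_append_colon u a
    have hpart : PySem.Chars.lstrip u ++ ':' :: PySem.Chars.rstrip a ≠ [] := by simp
    -- fold over lstrip u
    have hdecomp := List.takeWhile_append_dropWhile (p := PySem.Chars.isspace) (l := u)
    have hWws : ∀ c ∈ List.takeWhile PySem.Chars.isspace u, PySem.Chars.isspace c = true :=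
      fun c hc => List.mem_takeWhile_imp hc
    have hdecomp' : List.takeWhile PySem.Chars.isspace u ++ PySem.Chars.lstrip u = u := hdecomp
    have h1 : (u.foldl pvStep ([], none, none) : List Char × Option (List Char) × Option Char)
        = (PySem.Chars.lstrip u).foldl pvStep (List.takeWhile PySem.Chars.isspace u, none, none) := by
      conv_lhs => rw [← hdecomp]
      have hws := pvFold_ws (List.takeWhile PySem.Chars.isspace u) (PySem.Chars.lstrip u) hWws [] none
      simp only [List.nil_append] at hws
      exact hws
    rw [hfu, pvFold_shift0 (PySem.Chars.lstrip u) (List.takeWhile PySem.Chars.isspace u) none] at h1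
    have h1' : List.takeWhile PySem.Chars.isspace u ++ PySem.Chars.lstrip u
        = List.takeWhile PySem.Chars.isspace u ++ ((PySem.Chars.lstrip u).foldl pvStep ([], none, none)).1 := by
      rw [hdecomp']
      exact congrArg Prod.fst h1
    have hlu1 : ((PySem.Chars.lstrip u).foldl pvStep ([], none, none)).1 = PySem.Chars.lstrip u :=
      (List.append_cancel_left h1').symm
    have hlu2 := congrArg Prod.snd h1
    have hlu : (PySem.Chars.lstrip u).foldl pvStep ([], none, none) = (PySem.Chars.lstrip u, none, none) := by
      rw [Prod.ext_iff]
      exact ⟨hlu1, hlu2.symm⟩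
    -- fold over the stripped segment
    have hcolonstep : pvStep (PySem.Chars.lstrip u, none, none) ':' = (PySem.Chars.lstrip u, some [], none) := by
      simp [pvStep, pvQStep, pvSegStep]
    have hfold : (PySem.Chars.lstrip u ++ ':' :: PySem.Chars.rstrip a).foldl pvStep ([], none, none)
        = (PySem.Chars.lstrip u, some (PySem.Chars.rstrip a), (PySem.Chars.rstrip a).foldl pvQStep none) := by
      rw [List.foldl_append, hlu, List.foldl_cons, hcolonstep, pvFold_some]
      simp
    have h5 := pvScan_eq (PySem.Chars.lstrip u ++ ':' :: PySem.Chars.rstrip a) [] false "" none hrel0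
    rw [hfold] at h5
    simp only at h5
    have hfc1 : (cur.foldl pvStep ([], none, none)).1 = u := hnb
    simp only [pvProcPartA, pvEmit, hstrip, hpart, hfc1, h5]
    rw [pv_strip_lstrip, pv_strip_rstrip]
    simp

-- splitter production lemmas
theorem pvSplit_production (rest : List Char) (sep : Char) (parts : List (List Char))
    (cur : List Char) (inQ : Bool) (qc : String) :
    pvSplitUnquotedA rest sep parts cur inQ qc = parts ++ pvSplitUnquotedA rest sep [] cur inQ qc := by
  induction rest generalizing parts cur inQ qc with
  | nil => simp [pvSplitUnquotedA]
  | cons ch t ih =>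
    simp only [pvSplitUnquotedA]
    by_cases hc : ch = sep ∧ (pvQCharA inQ qc ch).1 = false
    · rw [if_pos hc, if_pos hc, ih, ih (parts := [] ++ [cur])]
      simp
    · rw [if_neg hc, if_neg hc, ih]

theorem pvSplit_length (rest : List Char) (sep : Char) (cur : List Char) (inQ : Bool) (qc : String) :
    1 ≤ (pvSplitUnquotedA rest sep [] cur inQ qc).length := by
  induction rest generalizing cur inQ qc with
  | nil => simp [pvSplitUnquotedA]
  | cons ch t ih =>
    simp only [pvSplitUnquotedA]
    by_cases hc : ch = sep ∧ (pvQCharA inQ qc ch).1 = false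
    · rw [if_pos hc, pvSplit_production]
      simp only [List.length_append]
      have := ih [] (pvQCharA inQ qc ch).1 (pvQCharA inQ qc ch).2
      omega
    · rw [if_neg hc]
      exact ih _ _ _

-- the main invariant: B's single pass computes A's split-then-process pipeline
theorem pvMain (rest : List Char) : ∀ (cur : List Char) (inQ : Bool) (qc : String)
    (q : Option Char) (nb : List Char) (ab : Option (List Char)) (fs : List (String × Bool)),
    pvQrel inQ qc q → (nb, ab, q) = cur.foldl pvStep ([], none, none) →
    (pvAltAux rest fs nb ab q true =
        (pvSplitUnquotedA rest '|' [] cur inQ qc).foldl pvProcPartA fs)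
    ∧ (pvAltAux rest [] nb ab q false =
        if 2 ≤ (pvSplitUnquotedA rest '|' [] cur inQ qc).length
        then ((pvSplitUnquotedA rest '|' [] cur inQ qc).drop 1).foldl pvProcPartA []
        else []) := by
  induction rest with
  | nil =>
    intro cur inQ qc q nb ab fs hrel hfold
    constructor
    · have h2 := pvEmit_eq cur fs
      rw [← hfold] at h2
      simp only [pvAltAux, pvSplitUnquotedA, List.nil_append, List.foldl_cons, List.foldl_nil]
      simpa using h2.symm
    · simp [pvAltAux, pvSplitUnquotedA]
  | cons ch t ih =>
    intro cur inQ qc q nb ab fs hrel hfold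
    have hrel' := pvQrel_step (inQ := inQ) (qc := qc) ch hrel
    have hiff := pvQrel_false hrel'
    by_cases hp : ch = '|' ∧ pvQStep q ch = none
    · -- segment boundary
      have hA : ch = '|' ∧ (pvQCharA inQ qc ch).1 = false := ⟨hp.1, hiff.mpr hp.2⟩
      have hrel0 : pvQrel (pvQCharA inQ qc ch).1 (pvQCharA inQ qc ch).2 (none : Option Char) := by
        rw [← hp.2]; exact hrel'
      have ihs := ih [] (pvQCharA inQ qc ch).1 (pvQCharA inQ qc ch).2 none [] none
      have hsplit : pvSplitUnquotedA (ch :: t) '|' [] cur inQ qc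
          = [cur] ++ pvSplitUnquotedA t '|' [] [] (pvQCharA inQ qc ch).1 (pvQCharA inQ qc ch).2 := by
        simp only [pvSplitUnquotedA]
        rw [if_pos hA, pvSplit_production]
        simp
      have h2 := pvEmit_eq cur fs
      rw [← hfold] at h2
      simp only at h2
      constructor
      · simp only [pvAltAux]
        rw [if_pos hp, hp.2]
        simp only [if_true]
        rw [(ihs (pvEmit fs nb ab) hrel0 rfl).1, hsplit]
        simp only [List.foldl_append, List.foldl_cons, List.foldl_nil]
        rw [h2]
      · simp only [pvAltAux]
        rw [if_pos hp, hp.2]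
        simp only [Bool.false_eq_true, if_false]
        rw [(ihs [] hrel0 rfl).1, hsplit]
        have hlen := pvSplit_length t '|' [] (pvQCharA inQ qc ch).1 (pvQCharA inQ qc ch).2
        rw [if_pos (by
          simp only [List.length_append, List.length_cons, List.length_nil]
          omega)]
        simp
    · -- ordinary character
      have hA : ¬ (ch = '|' ∧ (pvQCharA inQ qc ch).1 = false) := by
        intro hx
        exact hp ⟨hx.1, hiff.mp hx.2⟩
      have hfold' : ((pvSegStep nb ab (pvQStep q ch) ch).1, (pvSegStep nb ab (pvQStep q ch) ch).2, pvQStep q ch)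
          = (cur ++ [ch]).foldl pvStep ([], none, none) := by
        rw [List.foldl_append, ← hfold]
        rfl
      have ihs := ih (cur ++ [ch]) (pvQCharA inQ qc ch).1 (pvQCharA inQ qc ch).2 (pvQStep q ch)
        (pvSegStep nb ab (pvQStep q ch) ch).1 (pvSegStep nb ab (pvQStep q ch) ch).2
      have hsplit : pvSplitUnquotedA (ch :: t) '|' [] cur inQ qc
          = pvSplitUnquotedA t '|' [] (cur ++ [ch]) (pvQCharA inQ qc ch).1 (pvQCharA inQ qc ch).2 := by
        simp only [pvSplitUnquotedA]
        rw [if_neg hA]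
      constructor
      · simp only [pvAltAux]
        rw [if_neg hp, hsplit]
        exact (ihs fs hrel' hfold').1
      · simp only [pvAltAux]
        rw [if_neg hp, hsplit]
        exact (ihs [] hrel' hfold').2

-- ===== VERDICT (by name: the statement is the Claim_ definition above) =====
theorem parse_filter_chain_py_spec : Claim_equal_parse_filter_chain_py := by
  intro expr _
  unfold Spec_parse_filter_chain_py parse_filter_chain_py parse_filter_chain_py_alt
  have h := (pvMain expr.toList [] false "" none [] none [] rfl rfl).2
  rw [h]
  have hlen := pvSplit_length expr.toList '|' [] false ""
  by_cases h2 : 2 ≤ (pvSplitUnquotedA expr.toList '|' [] [] false "").length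
  · rw [if_pos h2, if_neg (by omega)]
  · rw [if_neg h2, if_pos (by omega)]
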